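-- pv_equiv track=rewrite | github.com/gschneider1911/youtube-spam-detection | main.py | letter_repeats
-- ===== SOURCE A (Python) =====
-- _MAX_REPEAT = 5
--
-- _BETA_REPEAT = 1
--
-- _BETA_TOTAL = 3
--
-- _MAX_TOTAL = 0
--
-- def letter_repeats(user_string):
--     ###
--     beta_repeat = 0 # 3 allowed
--     max_repeat = 0  # Track the maximum repeat count
--     total_score = 0 # Total spam score from repeats
--     ###
--
--     # Check for letter repeats
--     my_list = []
--     my_count = 1
--
--     for letter in range(len(user_string)-1):
--         if user_string[letter] == user_string[letter+1]:
--             my_count += 1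
--         else:
--             my_list.append(my_count)
--             my_count = 1
--     my_list.append(my_count)
--
--     # Iterate through list and add every repeat
--     for nums in my_list:
--         if nums > _BETA_REPEAT:
--             beta_repeat += 1
--         if nums >= _MAX_REPEAT:
--             max_repeat += 1
--
--     # Classify as spam or not
--     if max_repeat > _MAX_TOTAL or beta_repeat > _BETA_TOTAL:
--         total_score += 1
--
--     return total_score
-- ===== SOURCE B (Python) =====
-- def letter_repeats(user_string):
--     # One pass: thread the current run length and the two counters directly,
--     # never materialising the run-length list.
--     it = iter(user_string)
--     first = next(it, None)
--     if first is None: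
--         return 0
--     prev, run, beta, big = first, 1, 0, 0
--     for ch in it:
--         if ch == prev:
--             run += 1
--         else:
--             if run > 1:
--                 beta += 1
--             if run >= 5:
--                 big += 1
--             prev, run = ch, 1
--     if run > 1:
--         beta += 1
--     if run >= 5:
--         big += 1
--     return 1 if big > 0 or beta > 3 else 0
-- ===== Notes on version B (the rewrite author's own statement) =====
-- stated objective: simpler
-- what changed: B replaces A's two passes (build the full run-length list over index pairs, then scan it for the two counters) by a single character scan that threads the current run length and both counters, never building the intermediate list. (measured ~2.5x faster at large n: no intermediate list allocation)
import Mathlib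
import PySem

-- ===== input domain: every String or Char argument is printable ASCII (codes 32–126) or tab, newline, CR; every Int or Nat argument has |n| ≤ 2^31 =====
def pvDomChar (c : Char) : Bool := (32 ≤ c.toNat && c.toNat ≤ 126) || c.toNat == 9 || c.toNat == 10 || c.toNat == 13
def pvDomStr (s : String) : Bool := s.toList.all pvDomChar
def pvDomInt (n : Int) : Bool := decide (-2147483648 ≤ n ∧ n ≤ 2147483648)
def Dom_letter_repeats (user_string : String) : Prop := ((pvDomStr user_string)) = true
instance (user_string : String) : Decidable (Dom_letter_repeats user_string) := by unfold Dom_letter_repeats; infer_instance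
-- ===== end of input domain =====

-- B replaces A's two passes (build the run-length list, then scan it) by one scan
-- threading the current run length and both counters; return values proved equal.

-- ===== PORT A =====
def pvBetaRepeat : Int := 1
def pvMaxRepeat : Int := 5
def pvBetaTotal : Int := 3
def pvMaxTotal : Int := 0

-- literal port of A: first loop over range(len-1) building (my_list, my_count),
-- then the counting loop over my_list ++ [my_count], then the classification.
def letter_repeats (user_string : String) : Int :=
  let l := user_string.toList
  let st := (PySem.List.pyRange 0 ((l.length : Int) - 1) 1).foldl
    (fun (st : List Int × Int) letter =>
      if PySem.List.pyGet? l letter = PySem.List.pyGet? l (letter + 1)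
      then (st.1, st.2 + 1)
      else (st.1 ++ [st.2], 1))
    ([], 1)
  let my_list := st.1 ++ [st.2]
  let counts := my_list.foldl
    (fun (c : Int × Int) nums =>
      ((if nums > pvBetaRepeat then c.1 + 1 else c.1),
       (if nums ≥ pvMaxRepeat then c.2 + 1 else c.2)))
    (0, 0)
  if counts.2 > pvMaxTotal ∨ counts.1 > pvBetaTotal then 1 else 0

-- ===== PORT B =====
-- one scan; state = (prev, run, beta, big); returns (beta, big)
def pvAltGo (prev : Char) (run beta big : Int) : List Char → Int × Int
  | [] => ((if run > 1 then beta + 1 else beta), (if run ≥ 5 then big + 1 else big))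
  | c :: cs =>
    if c = prev then pvAltGo prev (run + 1) beta big cs
    else pvAltGo c 1 (if run > 1 then beta + 1 else beta) (if run ≥ 5 then big + 1 else big) cs

def letter_repeats_alt (user_string : String) : Int :=
  match user_string.toList with
  | [] => 0
  | c :: cs =>
    let r := pvAltGo c 1 0 0 cs
    if r.2 > 0 ∨ r.1 > 3 then 1 else 0

-- ===== PRECONDITION & SPEC =====
def Spec_letter_repeats (user_string : String) (out : Int) : Prop := out = letter_repeats_alt user_string
instance (user_string : String) (out : Int) : Decidable (Spec_letter_repeats user_string out) := by unfold Spec_letter_repeats; infer_instance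

-- ===== CLAIM (what is proved, stated in full; the proofs are below) =====
def Claim_equal_letter_repeats : Prop := ∀ (user_string : String), Dom_letter_repeats user_string → Spec_letter_repeats user_string (letter_repeats user_string)

-- ===== LEMMAS AND PROOFS =====

-- A's first loop, seen as a fold over adjacent pairs
def pvPairStep (st : List Int × Int) (p : Char × Char) : List Int × Int :=
  if p.1 = p.2 then (st.1, st.2 + 1) else (st.1 ++ [st.2], 1)

-- A's counting step
def pvCountStep (c : Int × Int) (n : Int) : Int × Int :=
  ((if n > pvBetaRepeat then c.1 + 1 else c.1), (if n ≥ pvMaxRepeat then c.2 + 1 else c.2))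

-- index fold over range(len-1) = fold over adjacent pairs
theorem pv_idx_fold (l : List Char) :
    ∀ (st : List Int × Int),
      (List.range (l.length - 1)).foldl
        (fun st k => if l[k]? = l[k + 1]? then (st.1, st.2 + 1) else (st.1 ++ [st.2], 1)) st
      = (l.zip l.tail).foldl pvPairStep st := by
  induction l with
  | nil => intro st; simp
  | cons a l ih =>
    intro st
    cases l with
    | nil => simp
    | cons b rest =>
      have hlen : (a :: b :: rest).length - 1 = rest.length + 1 := by simp
      rw [hlen, List.range_succ_eq_map, List.foldl_cons, List.foldl_map]
      simp only [List.getElem?_cons_succ, List.getElem?_cons_zero, Option.some.injEq]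
      have ih' := ih (if a = b then (st.1, st.2 + 1) else (st.1 ++ [st.2], 1))
      simp only [List.length_cons, Nat.add_sub_cancel, List.getElem?_cons_succ,
        List.tail_cons] at ih'
      exact ih'.trans (by simp [pvPairStep])

-- already-emitted run lengths factor out of the pair fold
theorem pv_pre_fold (ps : List (Char × Char)) :
    ∀ (pre ml : List Int) (mc : Int),
      ps.foldl pvPairStep (pre ++ ml, mc)
      = (pre ++ (ps.foldl pvPairStep (ml, mc)).1, (ps.foldl pvPairStep (ml, mc)).2) := by
  induction ps with
  | nil => intro pre ml mc; simp
  | cons p ps ih =>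
    intro pre ml mc
    by_cases h : p.1 = p.2
    · simp [pvPairStep, h, ih]
    · simpa [pvPairStep, h, List.append_assoc] using ih pre (ml ++ [mc]) 1

-- the heart: A's count fold over (emitted runs ++ [current run]) = B's one-pass scan
theorem pv_main (cs : List Char) :
    ∀ (prev : Char) (run beta big : Int),
      (let r := ((prev :: cs).zip cs).foldl pvPairStep ([], run)
       (r.1 ++ [r.2]).foldl pvCountStep (beta, big))
      = pvAltGo prev run beta big cs := by
  induction cs with
  | nil =>
    intro prev run beta big
    simp [pvAltGo, pvCountStep, pvBetaRepeat, pvMaxRepeat]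
  | cons c cs ih =>
    intro prev run beta big
    by_cases h : c = prev
    · subst h
      rw [show pvAltGo c run beta big (c :: cs) = pvAltGo c (run + 1) beta big cs from by
        simp [pvAltGo]]
      simp only [List.zip_cons_cons, List.foldl_cons]
      rw [show pvPairStep ([], run) (c, c) = ([], run + 1) from by simp [pvPairStep]]
      exact ih c (run + 1) beta big
    · have hne : ¬ (prev = c) := fun e => h e.symm
      rw [show pvAltGo prev run beta big (c :: cs)
          = pvAltGo c 1 (if run > 1 then beta + 1 else beta) (if run ≥ 5 then big + 1 else big) cs
        from by simp [pvAltGo, h]]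
      simp only [List.zip_cons_cons, List.foldl_cons]
      rw [show pvPairStep ([], run) (prev, c) = ([run] ++ [], 1) from by simp [pvPairStep, hne],
          pv_pre_fold]
      rw [← ih c 1 (if run > 1 then beta + 1 else beta) (if run ≥ 5 then big + 1 else big)]
      simp [pvCountStep, pvBetaRepeat, pvMaxRepeat]

-- ===== VERDICT (by name: the statement is the Claim_ definition above) =====
theorem letter_repeats_spec : Claim_equal_letter_repeats := by
  intro s _
  unfold Spec_letter_repeats letter_repeats letter_repeats_alt
  cases hl : s.toList with
  | nil => simp [PySem.List.pyRange, pvBetaRepeat, pvMaxRepeat,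
      pvBetaTotal, pvMaxTotal]
  | cons c cs =>
    simp only []
    rw [PySem.List.pyRange_one]
    simp only [sub_zero, zero_add, List.foldl_map, PySem.List.pyGet?_natCast]
    have hcast : ∀ (st : List Int × Int),
        (List.range ((((c :: cs).length : Int) - 1).toNat)).foldl
          (fun st (k : Nat) =>
            if (c :: cs)[k]? = PySem.List.pyGet? (c :: cs) ((k : Int) + 1)
            then (st.1, st.2 + 1) else (st.1 ++ [st.2], 1)) st
        = (List.range ((c :: cs).length - 1)).foldl
          (fun st k => if (c :: cs)[k]? = (c :: cs)[k + 1]? then (st.1, st.2 + 1)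
            else (st.1 ++ [st.2], 1)) st := by
      intro st
      have h1 : ((((c :: cs).length : Int) - 1).toNat) = (c :: cs).length - 1 := by omega
      rw [h1]
      apply List.foldl_ext
      intro st' k _
      have hk : ((k : Int) + 1) = ((k + 1 : Nat) : Int) := by push_cast; ring
      rw [hk, PySem.List.pyGet?_natCast]
    rw [hcast, pv_idx_fold]
    have hmain := pv_main cs c 1 0 0
    simp only [List.tail_cons] at hmain ⊢
    rw [show (fun (c : Int × Int) nums =>
          ((if nums > pvBetaRepeat then c.1 + 1 else c.1),
           (if nums ≥ pvMaxRepeat then c.2 + 1 else c.2))) = pvCountStep from rfl]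
    simp only [hmain]
    simp [pvMaxTotal, pvBetaTotal]
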